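-- pv_equiv track=rewrite | github.com/LivEliz/Collaborative-MultiAgent-Market-Analysis | main.py | generate_trends
-- ===== SOURCE A (Python) =====
-- def generate_trends(keywords):
--     trends = []
--     for kw in keywords:
--         if "battery" in kw:
--             trends.append("Battery life is a recurring concern")
--         elif "sound" in kw or "audio" in kw:
--             trends.append("Sound quality is highly valued")
--         elif "price" in kw or "cost" in kw or "value" in kw:
--             trends.append("Affordability influences customer satisfaction")
--         elif "quality" in kw:
--             trends.append("Build quality is a key factor")
--         else:
--             trends.append(f"Customers frequently mention {kw}")
--     return trends
-- ===== SOURCE B (Python) =====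
-- MESSAGES = [
--     "Battery life is a recurring concern",
--     "Sound quality is highly valued",
--     "Affordability influences customer satisfaction",
--     "Build quality is a key factor",
-- ]
--
-- PATTERNS = [
--     ("battery", 0),
--     ("sound", 1), ("audio", 1),
--     ("price", 2), ("cost", 2), ("value", 2),
--     ("quality", 3),
-- ]
--
--
-- def _classify(kw):
--     hits = [i for s, i in PATTERNS if s in kw]
--     return MESSAGES[min(hits)] if hits else f"Customers frequently mention {kw}"
--
--
-- def generate_trends(keywords):
--     return [_classify(kw) for kw in keywords]
-- ===== Notes on version B (the rewrite author's own statement) =====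
-- stated objective: alternative
-- what changed: Priority dispatch is now arithmetic: B collects the rule indices of ALL matching substrings for a keyword and indexes the message table by the minimum index, instead of A's short-circuiting first-match if/elif chain; output is built by map/comprehension instead of a loop with appends.
import Mathlib
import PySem

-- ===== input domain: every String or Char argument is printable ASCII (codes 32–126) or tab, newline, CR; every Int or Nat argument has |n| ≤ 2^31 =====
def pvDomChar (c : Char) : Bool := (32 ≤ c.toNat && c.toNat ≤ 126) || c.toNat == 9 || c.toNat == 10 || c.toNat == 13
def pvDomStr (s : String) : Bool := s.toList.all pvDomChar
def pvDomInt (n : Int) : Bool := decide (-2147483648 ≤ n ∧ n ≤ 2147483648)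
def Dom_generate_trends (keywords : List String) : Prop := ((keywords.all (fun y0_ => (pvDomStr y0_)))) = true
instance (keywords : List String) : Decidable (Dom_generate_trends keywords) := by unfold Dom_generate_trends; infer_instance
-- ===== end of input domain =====

-- B resolves rule priority arithmetically (min over all matched rule indices into a message table,
-- built by a comprehension) instead of A's short-circuiting if/elif chain; an alternative of equal cost.

-- ===== PORT A =====
def generate_trends (keywords : List String) : List String :=
  keywords.foldl (fun trends kw =>
    if PySem.Str.isIn "battery" kw then
      trends ++ ["Battery life is a recurring concern"]
    else if PySem.Str.isIn "sound" kw || PySem.Str.isIn "audio" kw then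
      trends ++ ["Sound quality is highly valued"]
    else if PySem.Str.isIn "price" kw || PySem.Str.isIn "cost" kw || PySem.Str.isIn "value" kw then
      trends ++ ["Affordability influences customer satisfaction"]
    else if PySem.Str.isIn "quality" kw then
      trends ++ ["Build quality is a key factor"]
    else
      trends ++ ["Customers frequently mention " ++ kw]) []

-- ===== PORT B =====
def pvMessages : List String :=
  [ "Battery life is a recurring concern",
    "Sound quality is highly valued",
    "Affordability influences customer satisfaction",
    "Build quality is a key factor" ]

def pvPatterns : List (String × Int) :=
  [ ("battery", 0),
    ("sound", 1), ("audio", 1),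
    ("price", 2), ("cost", 2), ("value", 2),
    ("quality", 3) ]

-- hits = [i for s, i in PATTERNS if s in kw]; MESSAGES[min(hits)] if hits else default.
-- MESSAGES[min(hits)]: the index is always 0..3 here, so pyGet? never returns none; .getD "" only discharges the Option.
def pvClassify (kw : String) : String :=
  let hits := (pvPatterns.filter (fun p => PySem.Str.isIn p.1 kw)).map Prod.snd
  match PySem.List.min? hits (fun i => i) with
  | some i => (PySem.List.pyGet? pvMessages i).getD ""
  | none => "Customers frequently mention " ++ kw

def generate_trends_alt (keywords : List String) : List String :=
  keywords.map pvClassify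

-- ===== PRECONDITION & SPEC =====
def Spec_generate_trends (keywords : List String) (out : List String) : Prop := out = generate_trends_alt keywords
instance (keywords : List String) (out : List String) : Decidable (Spec_generate_trends keywords out) := by unfold Spec_generate_trends; infer_instance

-- ===== CLAIM (what is proved, stated in full; the proofs are below) =====
def Claim_equal_generate_trends : Prop := ∀ (keywords : List String), Dom_generate_trends keywords → Spec_generate_trends keywords (generate_trends keywords)

-- ===== LEMMAS AND PROOFS =====
theorem pvClassify_eq (kw : String) :
    pvClassify kw =
      (if PySem.Str.isIn "battery" kw then "Battery life is a recurring concern"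
       else if PySem.Str.isIn "sound" kw || PySem.Str.isIn "audio" kw then "Sound quality is highly valued"
       else if PySem.Str.isIn "price" kw || PySem.Str.isIn "cost" kw || PySem.Str.isIn "value" kw then
         "Affordability influences customer satisfaction"
       else if PySem.Str.isIn "quality" kw then "Build quality is a key factor"
       else "Customers frequently mention " ++ kw) := by
  unfold pvClassify pvPatterns
  simp only [List.filter_cons, List.filter_nil]
  generalize PySem.Str.isIn "battery" kw = b1
  generalize PySem.Str.isIn "sound" kw = b2
  generalize PySem.Str.isIn "audio" kw = b3
  generalize PySem.Str.isIn "price" kw = b4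
  generalize PySem.Str.isIn "cost" kw = b5
  generalize PySem.Str.isIn "value" kw = b6
  generalize PySem.Str.isIn "quality" kw = b7
  cases b1 <;> cases b2 <;> cases b3 <;> cases b4 <;> cases b5 <;> cases b6 <;> cases b7 <;> rfl

theorem genA_eq_map (keywords : List String) : ∀ (acc : List String),
    List.foldl (fun trends kw =>
      if PySem.Str.isIn "battery" kw then
        trends ++ ["Battery life is a recurring concern"]
      else if PySem.Str.isIn "sound" kw || PySem.Str.isIn "audio" kw then
        trends ++ ["Sound quality is highly valued"]
      else if PySem.Str.isIn "price" kw || PySem.Str.isIn "cost" kw || PySem.Str.isIn "value" kw then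
        trends ++ ["Affordability influences customer satisfaction"]
      else if PySem.Str.isIn "quality" kw then
        trends ++ ["Build quality is a key factor"]
      else
        trends ++ ["Customers frequently mention " ++ kw]) acc keywords
    = acc ++ keywords.map pvClassify := by
  induction keywords with
  | nil => simp
  | cons k t ih =>
    intro acc
    simp only [List.foldl_cons, List.map_cons, ih, pvClassify_eq]
    split_ifs <;> simp

-- ===== VERDICT =====
theorem generate_trends_spec : Claim_equal_generate_trends := by
  intro keywords _
  unfold Spec_generate_trends generate_trends generate_trends_alt
  rw [genA_eq_map]
  simp
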